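-- pv_equiv track=rewrite | github.com/alufers/mitmproxy2swagger | mitmproxy2swagger/swagger_util.py | path_template_to_endpoint_name
-- ===== SOURCE A (Python) =====
-- VERBS = [
--     "add",
--     "create",
--     "delete",
--     "get",
--     "attach",
--     "detach",
--     "update",
--     "push",
--     "extendedcreate",
--     "activate",
-- ]
--
-- def path_template_to_endpoint_name(method, path_template):
--     path_template = path_template.strip("/")
--     segments = path_template.split("/")
--     # remove params to a separate array
--     params = []
--     for idx, segment in enumerate(segments):
--         if segment.startswith("{") and segment.endswith("}"):
--             params.append(segment)
--             segments[idx] = "{}"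
--     # remove them from the segments
--     segments = [segment for segment in segments if segment != "{}"]
--     # reverse the segments
--     segments.reverse()
--     name_parts = []
--     for segment in segments:
--         if segment in VERBS:
--             # prepend to the name_parts
--             name_parts.insert(0, segment.lower())
--         else:
--             name_parts.insert(0, segment.lower())
--             break
--     for param in params:
--         name_parts.append("by " + param.replace("{", "").replace("}", ""))
--         break
--     return method.upper() + " " + " ".join(name_parts)
-- ===== SOURCE B (Python) =====
-- VERBS = [
--     "add",
--     "create",
--     "delete",
--     "get",
--     "attach",
--     "detach",
--     "update",
--     "push",
--     "extendedcreate",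
--     "activate",
-- ]
--
--
-- def path_template_to_endpoint_name(method, path_template):
--     segments = path_template.strip("/").split("/")
--     is_param = lambda s: s.startswith("{") and s.endswith("}")
--     params = [s for s in segments if is_param(s)]
--     rest = [s for s in segments if not is_param(s)]
--     # single forward pass: restart at every non-verb segment, append verbs after it
--     name_parts = []
--     for segment in rest:
--         if segment in VERBS:
--             name_parts.append(segment.lower())
--         else:
--             name_parts = [segment.lower()]
--     if params:
--         name_parts.append("by " + params[0].replace("{", "").replace("}", ""))
--     return method.upper() + " " + " ".join(name_parts)
-- ===== Notes on version B (the rewrite author's own statement) =====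
-- stated objective: simpler
-- what changed: Params are pulled out with two comprehensions instead of enumerate-mutate-then-filter, and the reverse/insert(0)/break loop is replaced by one forward pass that restarts the name list at each non-verb segment.
import Mathlib
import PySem

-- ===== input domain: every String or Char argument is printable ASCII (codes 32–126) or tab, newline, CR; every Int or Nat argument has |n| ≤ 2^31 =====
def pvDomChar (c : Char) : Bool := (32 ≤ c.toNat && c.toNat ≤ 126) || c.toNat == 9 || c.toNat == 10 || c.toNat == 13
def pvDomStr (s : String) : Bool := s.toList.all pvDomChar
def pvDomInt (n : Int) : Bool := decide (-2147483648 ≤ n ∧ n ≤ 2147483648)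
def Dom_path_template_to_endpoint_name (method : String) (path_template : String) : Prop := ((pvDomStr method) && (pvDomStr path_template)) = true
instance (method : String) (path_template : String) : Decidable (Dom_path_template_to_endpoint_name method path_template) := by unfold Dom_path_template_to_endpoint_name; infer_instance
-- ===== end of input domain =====

-- B replaces A's enumerate-mutate-filter param extraction by two filters and the
-- reverse/insert(0)/break loop by one forward pass that restarts at each non-verb segment (objective: simpler).

def VERBS : List String :=
  ["add", "create", "delete", "get", "attach", "detach", "update", "push",
   "extendedcreate", "activate"]

-- segment.startswith("{") and segment.endswith("}")  (same expression in A and B)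
def pvIsParam (s : String) : Bool :=
  PySem.Str.startswith s "{" && PySem.Str.endswith s "}"

-- ===== PORT A =====
-- A's enumerate loop: collects params and rewrites each param slot to "{}" (mutation rebuilt)
def pvAExtract : List String → List String × List String
  | [] => ([], [])
  | s :: rest =>
    let (ps, ss) := pvAExtract rest
    if pvIsParam s then (s :: ps, "{}" :: ss) else (ps, s :: ss)

-- A's loop over the reversed segments: insert at front, break at the first non-verb
def pvALoop (acc : List String) : List String → List String
  | [] => acc
  | s :: rest =>
    if VERBS.contains s then pvALoop (PySem.Str.lower s :: acc) rest
    else PySem.Str.lower s :: acc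

def path_template_to_endpoint_name (method : String) (path_template : String) : String :=
  let path_template := PySem.Str.stripChars path_template "/"
  -- split("/"): the separator "/" is nonempty, so split? is always `some`
  let segments := (PySem.Str.split? path_template "/").getD []
  let (params, segments) := pvAExtract segments
  let segments := segments.filter (fun s => s != "{}")
  let name_parts := pvALoop [] segments.reverse
  let name_parts :=
    match params with
    | [] => name_parts
    | p :: _ =>
      name_parts ++ ["by " ++ PySem.Str.replace (PySem.Str.replace p "{" "") "}" ""]
  PySem.Str.upper method ++ " " ++ PySem.Str.join " " name_parts

-- ===== PORT B =====
def path_template_to_endpoint_name_alt (method : String) (path_template : String) : String :=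
  -- split("/"): the separator "/" is nonempty, so split? is always `some`
  let segments := (PySem.Str.split? (PySem.Str.stripChars path_template "/") "/").getD []
  let params := segments.filter pvIsParam
  let rest := segments.filter (fun s => !pvIsParam s)
  let name_parts := rest.foldl
    (fun acc s =>
      if VERBS.contains s then acc ++ [PySem.Str.lower s] else [PySem.Str.lower s]) []
  let name_parts :=
    match params with
    | [] => name_parts
    | p :: _ =>
      name_parts ++ ["by " ++ PySem.Str.replace (PySem.Str.replace p "{" "") "}" ""]
  PySem.Str.upper method ++ " " ++ PySem.Str.join " " name_parts

-- ===== PRECONDITION & SPEC =====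
def Spec_path_template_to_endpoint_name (method : String) (path_template : String) (out : String) : Prop := out = path_template_to_endpoint_name_alt method path_template
instance (method : String) (path_template : String) (out : String) : Decidable (Spec_path_template_to_endpoint_name method path_template out) := by unfold Spec_path_template_to_endpoint_name; infer_instance

-- ===== CLAIM (what is proved, stated in full; the proofs are below) =====
def Claim_equal_path_template_to_endpoint_name : Prop := ∀ (method : String) (path_template : String), Dom_path_template_to_endpoint_name method path_template → Spec_path_template_to_endpoint_name method path_template (path_template_to_endpoint_name method path_template)

-- ===== LEMMAS AND PROOFS =====

lemma pvAExtract_fst (xs : List String) : (pvAExtract xs).1 = xs.filter pvIsParam := by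
  induction xs with
  | nil => rfl
  | cons s rest ih =>
    simp only [pvAExtract, List.filter_cons]
    split_ifs with h <;> simp [ih]

lemma pvAExtract_snd (xs : List String) :
    (pvAExtract xs).2 = xs.map (fun s => if pvIsParam s then "{}" else s) := by
  induction xs with
  | nil => rfl
  | cons s rest ih =>
    simp only [pvAExtract, List.map_cons]
    split_ifs with h <;> simp [ih]

lemma pvIsParam_braces : pvIsParam "{}" = true := by decide

lemma pvMarked_filter (xs : List String) :
    (xs.map (fun s => if pvIsParam s then "{}" else s)).filter (fun s => s != "{}") =
      xs.filter (fun s => !pvIsParam s) := by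
  induction xs with
  | nil => rfl
  | cons s rest ih =>
    by_cases h : pvIsParam s = true
    · simp [h, ih]
    · have hne : s ≠ "{}" := fun he => h (he ▸ pvIsParam_braces)
      simp [h, hne, ih]

lemma pvALoop_reverse (xs : List String) : ∀ acc,
    pvALoop acc xs.reverse =
      xs.foldl
        (fun acc s =>
          if VERBS.contains s then acc ++ [PySem.Str.lower s] else [PySem.Str.lower s]) []
        ++ acc := by
  induction xs using List.reverseRecOn with
  | nil => intro acc; rfl
  | append_singleton xs x ih =>
    intro acc
    rw [List.reverse_append, List.foldl_append]
    simp only [List.reverse_singleton, List.singleton_append, pvALoop, List.foldl_cons,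
      List.foldl_nil]
    by_cases h : x ∈ VERBS
    · simp [h, ih]
    · simp [h]

-- ===== VERDICT (by name: the statement is the Claim_ definition above) =====
theorem path_template_to_endpoint_name_spec : Claim_equal_path_template_to_endpoint_name := by
  intro method path_template _
  unfold Spec_path_template_to_endpoint_name
  unfold path_template_to_endpoint_name path_template_to_endpoint_name_alt
  simp only [pvAExtract_fst, pvAExtract_snd, pvMarked_filter, pvALoop_reverse, List.append_nil]
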